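-- pv_equiv track=rewrite | github.com/JIE77777/Wagstaff-Lab | core/indexers/mechanism_index.py | _build_component_usage
-- ===== SOURCE A (Python) =====
-- from typing import Any, Dict, List, Optional, Set
--
-- def _build_component_usage(prefab_links: Dict[str, Any]) -> Dict[str, List[str]]:
--     usage: Dict[str, Set[str]] = {}
--     for pid, row in (prefab_links or {}).items():
--         comps = row.get("components") if isinstance(row, dict) else None
--         if not isinstance(comps, list):
--             continue
--         for c in comps:
--             if not c:
--                 continue
--             usage.setdefault(str(c), set()).add(str(pid))
--     return {k: sorted(v) for k, v in usage.items()}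
-- ===== SOURCE B (Python) =====
-- def _build_component_usage(prefab_links):
--     links = prefab_links or {}
--     pairs = [(str(c), str(pid))
--              for pid, row in links.items()
--              if isinstance(row, dict) and isinstance(row.get("components"), list)
--              for c in row["components"] if c]
--     keys = dict.fromkeys(c for c, _ in pairs)
--     return {k: sorted({p for c, p in pairs if c == k}) for k in keys}
-- ===== Notes on version B (the rewrite author's own statement) =====
-- stated objective: alternative
-- what changed: B flattens the input once into a (component, pid) edge list, deduplicates the component keys once in first-occurrence order, and builds each output entry by scanning that edge list, instead of A's incremental dict-of-sets accumulation with setdefault/add.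
import Mathlib
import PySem

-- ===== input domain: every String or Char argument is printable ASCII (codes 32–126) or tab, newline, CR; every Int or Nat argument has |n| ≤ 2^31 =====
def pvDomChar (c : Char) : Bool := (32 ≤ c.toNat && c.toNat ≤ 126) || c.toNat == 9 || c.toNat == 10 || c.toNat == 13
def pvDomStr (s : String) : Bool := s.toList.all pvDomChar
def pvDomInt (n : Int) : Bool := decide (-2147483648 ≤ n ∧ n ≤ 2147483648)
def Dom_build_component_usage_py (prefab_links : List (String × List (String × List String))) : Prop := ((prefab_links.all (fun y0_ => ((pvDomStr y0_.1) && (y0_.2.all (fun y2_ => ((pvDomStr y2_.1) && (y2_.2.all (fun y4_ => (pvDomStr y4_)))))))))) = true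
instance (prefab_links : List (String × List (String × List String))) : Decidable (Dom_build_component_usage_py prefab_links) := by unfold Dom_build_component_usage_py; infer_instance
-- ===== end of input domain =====

-- B replaces A's dict-of-sets accumulation by flattening to a (component, pid) edge list, deduplicating
-- the component keys once, and building each output entry by a scan of the edge list (objective: alternative).


-- ===== PORT A =====
-- literal transliteration of _build_component_usage: a dict component → set-of-pids built with
-- setdefault(..., set()).add(pid) (= Dict.modify with default ∅), then {k: sorted(v) for k, v in usage.items()}.
-- one iteration of A's outer loop, on comps = row.get("components") (none = not a list → continue)
def pvRowA (p : String) (usage : PySem.Dict String (PySem.Set String)) :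
    Option (List String) → PySem.Dict String (PySem.Set String)
  | none => usage
  | some comps =>
      comps.foldl (fun usage c =>
        if c = "" then usage
        else PySem.Dict.modify usage c PySem.Set.empty (fun s => PySem.Set.add s p)) usage

def build_component_usage_py (prefab_links : List (String × List (String × List String))) : List (String × List String) :=
  let usage : PySem.Dict String (PySem.Set String) :=
    prefab_links.foldl (fun usage pr =>
      pvRowA pr.1 usage (PySem.Dict.get? (PySem.Dict.mk pr.2) "components"))
      PySem.Dict.empty
  (usage.items.foldl (fun d kv =>
      PySem.Dict.insert d kv.1 (PySem.List.sorted kv.2 (fun x => x) false)) PySem.Dict.empty).items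

-- ===== PORT B =====
-- 'pairs': the flattened [(str(c), str(pid)) ...] edge list of Source B
-- the edges contributed by one row of Source B's comprehension
def pvRowB (p : String) : Option (List String) → List (String × String)
  | none => []
  | some comps => (comps.filter (fun c => !decide (c = ""))).map (fun c => (c, p))

def pvPairsB (prefab_links : List (String × List (String × List String))) : List (String × String) :=
  prefab_links.flatMap (fun pr => pvRowB pr.1 (PySem.Dict.get? (PySem.Dict.mk pr.2) "components"))

def build_component_usage_py_alt (prefab_links : List (String × List (String × List String))) : List (String × List String) :=
  let pairs := pvPairsB prefab_links
  let keys := PySem.List.dedup (pairs.map Prod.fst)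
  keys.map (fun k =>
    (k, PySem.List.sorted (PySem.Set.ofList ((pairs.filter (fun cp => cp.1 == k)).map Prod.snd)) (fun x => x) false))

-- ===== PRECONDITION & SPEC =====
def Spec_build_component_usage_py (prefab_links : List (String × List (String × List String))) (out : List (String × List String)) : Prop := out = build_component_usage_py_alt prefab_links
instance (prefab_links : List (String × List (String × List String))) (out : List (String × List String)) : Decidable (Spec_build_component_usage_py prefab_links out) := by unfold Spec_build_component_usage_py; infer_instance

-- ===== CLAIM (what is proved, stated in full; the proofs are below) =====
def Claim_equal_build_component_usage_py : Prop := ∀ (prefab_links : List (String × List (String × List String))), Dom_build_component_usage_py prefab_links → Spec_build_component_usage_py prefab_links (build_component_usage_py prefab_links)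

-- ===== LEMMAS AND PROOFS =====

-- the accumulation step of A, over one (component, pid) edge
def pvStepM (d : PySem.Dict String (PySem.Set String)) (cp : String × String) : PySem.Dict String (PySem.Set String) :=
  PySem.Dict.modify d cp.1 PySem.Set.empty (fun s => PySem.Set.add s cp.2)

-- A's inner loop over comps = a fold of pvStepM over the row's edges
theorem pv_inner (comps : List String) (p : String) (d : PySem.Dict String (PySem.Set String)) :
    comps.foldl (fun usage c =>
        if c = "" then usage
        else PySem.Dict.modify usage c PySem.Set.empty (fun s => PySem.Set.add s p)) d
      = ((comps.filter (fun c => !decide (c = ""))).map (fun c => (c, p))).foldl pvStepM d := by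
  induction comps generalizing d with
  | nil => rfl
  | cons c cs ih =>
      by_cases hc : c = ""
      · simpa [hc] using ih d
      · simpa [hc, pvStepM] using ih (PySem.Dict.modify d c PySem.Set.empty (fun s => PySem.Set.add s p))

-- A's outer loop = a fold of pvStepM over the flattened edge list
theorem pvPairsB_cons (pr : String × List (String × List String)) (rest : List (String × List (String × List String))) :
    pvPairsB (pr :: rest) = pvRowB pr.1 (PySem.Dict.get? (PySem.Dict.mk pr.2) "components") ++ pvPairsB rest := rfl

theorem pv_outer (L : List (String × List (String × List String))) (d : PySem.Dict String (PySem.Set String)) :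
    L.foldl (fun usage pr =>
      pvRowA pr.1 usage (PySem.Dict.get? (PySem.Dict.mk pr.2) "components")) d
      = (pvPairsB L).foldl pvStepM d := by
  induction L generalizing d with
  | nil => rfl
  | cons pr rest ih =>
      rw [pvPairsB_cons, List.foldl_append]
      simp only [List.foldl_cons]
      cases h : PySem.Dict.get? (PySem.Dict.mk pr.2) "components" with
      | none => simp only [pvRowA, pvRowB, List.foldl_nil]; exact ih d
      | some comps =>
          simp only [pvRowA, pvRowB]
          rw [pv_inner]
          exact ih _

-- value of the accumulated dict at any key
theorem pv_getD (ps : List (String × String)) (d : PySem.Dict String (PySem.Set String)) (c : String) :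
    (ps.foldl pvStepM d).getD c PySem.Set.empty
      = PySem.Set.update (d.getD c PySem.Set.empty) ((ps.filter (fun cp => cp.1 == c)).map Prod.snd) := by
  induction ps generalizing d with
  | nil => rfl
  | cons cp rest ih =>
      rw [List.foldl_cons, ih]
      by_cases h : cp.1 = c
      · subst h
        simp [pvStepM, PySem.Dict.getD_modify_self, PySem.Set.update_cons]
      · simp [pvStepM, PySem.Dict.getD_modify, h, Ne.symm h]

-- items of the accumulated dict, in closed form
theorem pv_items (ps : List (String × String)) :
    (ps.foldl pvStepM PySem.Dict.empty).items
      = (PySem.List.dedup (ps.map Prod.fst)).map (fun k =>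
          (k, PySem.Set.ofList ((ps.filter (fun cp => cp.1 == k)).map Prod.snd))) := by
  have hnd : (ps.foldl pvStepM PySem.Dict.empty).keys.Nodup := by
    simpa [pvStepM] using
      PySem.Dict.nodup_keys_foldl_modify_key ps Prod.fst PySem.Set.empty
        (fun d cp => fun s => PySem.Set.add s cp.2) PySem.Dict.empty (by simp)
  have hkeys : (ps.foldl pvStepM PySem.Dict.empty).keys = PySem.List.dedup (ps.map Prod.fst) := by
    simpa [pvStepM, PySem.Set.update_nil_left] using
      PySem.Dict.keys_foldl_modify_key ps Prod.fst PySem.Set.empty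
        (fun d cp => fun s => PySem.Set.add s cp.2) PySem.Dict.empty
  rw [PySem.Dict.items_eq_map_keys _ hnd PySem.Set.empty, hkeys]
  refine List.map_congr_left (fun k hk => ?_)
  rw [pv_getD]
  simp [PySem.Set.update_nil_left]

-- the final dict comprehension over distinct keys appends entry by entry
theorem pv_final (l : List (String × PySem.Set String)) (hnd : (l.map Prod.fst).Nodup) :
    (l.foldl (fun d kv =>
        PySem.Dict.insert d kv.1 (PySem.List.sorted kv.2 (fun x => x) false)) PySem.Dict.empty).items
      = l.map (fun kv => (kv.1, PySem.List.sorted kv.2 (fun x => x) false)) := by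
  simpa using
    PySem.Dict.items_foldl_insert_fresh l (Prod.fst : String × PySem.Set String → String)
      (fun kv => PySem.List.sorted kv.2 (fun x => x) false) PySem.Dict.empty
      (by simp) hnd

-- ===== VERDICT (by name: the statement is the Claim_ definition above) =====
theorem build_component_usage_py_spec : Claim_equal_build_component_usage_py := by
  intro L _
  unfold Spec_build_component_usage_py build_component_usage_py build_component_usage_py_alt
  rw [pv_outer]
  have h1 := pv_items (pvPairsB L)
  have hnd : (((pvPairsB L).foldl pvStepM PySem.Dict.empty).items.map Prod.fst).Nodup := by
    rw [h1]; simp [List.map_map, Function.comp_def, PySem.Set.nodup_ofList]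
  rw [pv_final _ hnd, h1]
  simp [List.map_map, Function.comp]
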